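-- pv_equiv track=rewrite | github.com/mitruho/cannon | ui.py | merge_scores
-- ===== SOURCE A (Python) =====
-- def merge_scores(scores):
--     merged_scores = {}
--     for nickname, score in scores:
--         if nickname in merged_scores:
--             merged_scores[nickname] = max(merged_scores[nickname], score)
--         else:
--             merged_scores[nickname] = score
--     return list(merged_scores.items())
-- ===== SOURCE B (Python) =====
-- def merge_scores(scores):
--     # pass 1: group all scores per nickname, preserving first-seen order
--     groups = {}
--     for nickname, score in scores:
--         groups.setdefault(nickname, []).append(score)
--     # pass 2: reduce each group to its maximum
--     return [(nickname, max(vals)) for nickname, vals in groups.items()]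
-- ===== Notes on version B (the rewrite author's own statement) =====
-- stated objective: alternative
-- what changed: Replaces A's streaming running-max dict with a two-pass build-index-then-reduce structure: first group all scores per nickname into lists, then map each group to max(vals).
import Mathlib
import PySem

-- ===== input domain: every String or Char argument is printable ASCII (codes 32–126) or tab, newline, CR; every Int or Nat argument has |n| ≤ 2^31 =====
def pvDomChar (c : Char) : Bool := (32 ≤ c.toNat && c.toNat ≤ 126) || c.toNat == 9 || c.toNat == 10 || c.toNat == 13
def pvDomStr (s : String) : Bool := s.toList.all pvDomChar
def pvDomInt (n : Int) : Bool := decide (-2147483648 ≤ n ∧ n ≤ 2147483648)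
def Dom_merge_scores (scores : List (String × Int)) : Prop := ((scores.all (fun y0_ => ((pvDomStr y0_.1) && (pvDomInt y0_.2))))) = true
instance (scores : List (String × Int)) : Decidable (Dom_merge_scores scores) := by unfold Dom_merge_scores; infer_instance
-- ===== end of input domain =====

-- B groups all scores per nickname first and reduces each group with max in a second pass,
-- instead of A's streaming running-max; same return value, proved equal on Dom.


-- ===== PORT A =====
-- merged_scores = {}; for nickname, score in scores: if in dict take max else insert; list(items())
def merge_scores (scores : List (String × Int)) : List (String × Int) :=
  (scores.foldl
    (fun d p =>
      if d.contains p.1 then d.insert p.1 (max (d.getD p.1 p.2) p.2)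
      else d.insert p.1 p.2)
    PySem.Dict.empty).items

-- ===== PORT B =====
-- max(vals) for a nonempty Python list (none case unreachable in B)
def pyMaxList (vs : List Int) : Int := (PySem.List.max? vs id).getD 0
-- pass 1: groups.setdefault(nickname, []).append(score) == d.modify nickname [] (· ++ [score])
-- pass 2: [(nickname, max(vals)) for nickname, vals in groups.items()]
def merge_scores_alt (scores : List (String × Int)) : List (String × Int) :=
  ((scores.foldl (fun d p => d.modify p.1 [] (· ++ [p.2])) PySem.Dict.empty).items).map
    (fun p => (p.1, pyMaxList p.2))

-- ===== PRECONDITION & SPEC =====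
def Spec_merge_scores (scores : List (String × Int)) (out : List (String × Int)) : Prop := out = merge_scores_alt scores
instance (scores : List (String × Int)) (out : List (String × Int)) : Decidable (Spec_merge_scores scores out) := by unfold Spec_merge_scores; infer_instance

-- ===== CLAIM (what is proved, stated in full; the proofs are below) =====
def Claim_equal_merge_scores : Prop := ∀ (scores : List (String × Int)), Dom_merge_scores scores → Spec_merge_scores scores (merge_scores scores)

-- ===== LEMMAS AND PROOFS =====

theorem pyMaxList_cons (v : Int) (vt : List Int) :
    pyMaxList (v :: vt) = vt.foldl max v := by
  induction vt generalizing v with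
  | nil => rfl
  | cons w wt ih =>
    have hmax := ih (max v w)
    simp only [pyMaxList, PySem.List.max?, List.foldl_cons] at hmax ⊢
    have hif : (if id v < id w then some w else some v) = some (max v w) := by
      by_cases h : v < w <;> simp [h, max_def] <;> omega
    rw [hif]
    exact hmax

theorem pyMaxList_append_singleton (vs : List Int) (hvs : vs ≠ []) (s : Int) :
    pyMaxList (vs ++ [s]) = max (pyMaxList vs) s := by
  obtain ⟨v, vt, rfl⟩ := List.exists_cons_of_ne_nil hvs
  rw [List.cons_append, pyMaxList_cons, pyMaxList_cons, List.foldl_append]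
  rfl

theorem merge_loop_inv (l : List (String × Int))
    (dA : PySem.Dict String Int) (dB : PySem.Dict String (List Int))
    (hk : dB.keys.Nodup)
    (hI : dA.items = dB.items.map (fun p => (p.1, pyMaxList p.2)))
    (hne : ∀ p ∈ dB.items, p.2 ≠ []) :
    (l.foldl
      (fun d p =>
        if d.contains p.1 then d.insert p.1 (max (d.getD p.1 p.2) p.2)
        else d.insert p.1 p.2) dA).items
    = ((l.foldl (fun d p => d.modify p.1 [] (· ++ [p.2])) dB).items).map
        (fun p => (p.1, pyMaxList p.2)) := by
  induction l generalizing dA dB with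
  | nil => simpa using hI
  | cons q qt ih =>
    obtain ⟨n, s⟩ := q
    have hkeys : dA.keys = dB.keys := by
      simp [PySem.Dict.keys, hI, Function.comp]
    have hkA : dA.keys.Nodup := hkeys ▸ hk
    have hcon : dA.contains n = dB.contains n := by
      rw [PySem.Dict.contains_eq_decide_mem_keys, PySem.Dict.contains_eq_decide_mem_keys, hkeys]
    simp only [List.foldl_cons]
    rw [show (dB.modify n [] (· ++ [s])) = dB.insert n (dB.getD n [] ++ [s]) from rfl]
    by_cases h : dB.contains n = true
    · -- nickname already present
      have hget : ∃ vs, dB.get? n = some vs := by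
        have := PySem.Dict.contains_eq_isSome_get? dB n
        rw [h] at this
        exact Option.isSome_iff_exists.mp this.symm
      obtain ⟨vs, hvs⟩ := hget
      have hmemB : (n, vs) ∈ dB.items := PySem.Dict.mem_items_of_get?_eq_some dB hvs
      have hvsne : vs ≠ [] := hne _ hmemB
      have hgetD : dB.getD n [] = vs := PySem.Dict.getD_of_get?_eq_some dB [] hvs
      have hmemA : (n, pyMaxList vs) ∈ dA.items := by
        rw [hI]; exact List.mem_map_of_mem hmemB
      have hgetA : dA.getD n s = pyMaxList vs :=
        PySem.Dict.getD_of_mem_items dA hmemA hkA s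
      rw [if_pos (hcon ▸ h)]
      apply ih
      · rw [PySem.Dict.keys_insert_of_contains dB _ h]; exact hk
      · rw [PySem.Dict.items_insert_of_contains dA _ (hcon ▸ h),
            PySem.Dict.items_insert_of_contains dB _ h, hI, List.map_map, List.map_map]
        apply List.map_congr_left
        intro p hp
        by_cases hpn : p.1 == n
        · simp [Function.comp, hpn, hgetA, hgetD,
                pyMaxList_append_singleton vs hvsne s]
        · simp [Function.comp, hpn]
      · intro p hp
        rw [PySem.Dict.items_insert_of_contains dB _ h] at hp
        obtain ⟨q, hq, rfl⟩ := List.mem_map.mp hp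
        by_cases hqn : q.1 == n
        · simp [hqn]
        · simpa [hqn] using hne q hq
    · -- fresh nickname
      have h' : dB.contains n = false := by simpa using h
      have hA' : dA.contains n = false := by rw [hcon]; exact h'
      rw [if_neg (by simp [hA'])]
      apply ih
      · exact PySem.Dict.nodup_keys_insert dB _ _ hk
      · rw [PySem.Dict.items_insert_of_not_contains dA _ hA',
            PySem.Dict.items_insert_of_not_contains dB _ h', hI, List.map_append]
        have : dB.getD n [] = [] := PySem.Dict.getD_of_not_contains dB _ h'
        simp [this, pyMaxList_cons]
      · intro p hp
        rw [PySem.Dict.items_insert_of_not_contains dB _ h'] at hp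
        rcases List.mem_append.mp hp with hp | hp
        · exact hne p hp
        · have : dB.getD n [] = [] := PySem.Dict.getD_of_not_contains dB _ h'
          simp_all

-- ===== VERDICT (by name: the statement is the Claim_ definition above) =====
theorem merge_scores_spec : Claim_equal_merge_scores := by
  intro scores _
  unfold Spec_merge_scores merge_scores merge_scores_alt
  exact merge_loop_inv scores PySem.Dict.empty PySem.Dict.empty
    (by decide) (by rfl) (by intro p hp; simp [PySem.Dict.empty] at hp)
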